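-- pv_equiv track=rewrite | github.com/HarithAl-Obaidi/Scientific-Article-Extractor | article_extraction.py | specified_extraction
-- ===== SOURCE A (Python) =====
-- def specified_extraction(start, end, text, start_order):
--     extraction = False
--     extracted_text = []
--     current_order = 0
--     for word in text:
--         if start.lower() == word.lower():
--             current_order += 1
--             if current_order == start_order:
--                 extraction = True
--         if extraction:
--             extracted_text += [word]
--         if end.lower() == word.lower():
--             extraction = False
--     return extracted_text[1:-1]
-- ===== SOURCE B (Python) =====
-- def _nth_start_suffix(sl, words, n):
--     # suffix of words beginning at the n-th word whose lowercase equals sl, or None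
--     if n < 1:
--         return None
--     for k, w in enumerate(words):
--         if w.lower() == sl:
--             if n == 1:
--                 return words[k:]
--             n -= 1
--     return None
--
--
-- def _take_through_end(el, tail):
--     # prefix of tail up to and including the first word whose lowercase equals el
--     out = []
--     for w in tail:
--         out.append(w)
--         if w.lower() == el:
--             break
--     return out
--
--
-- def specified_extraction(start, end, text, start_order):
--     sl = start.lower()
--     el = end.lower()
--     words = list(text)
--     tail = _nth_start_suffix(sl, words, start_order)
--     if tail is None:
--         return []
--     return _take_through_end(el, tail)[1:-1]
-- ===== Notes on version B (the rewrite author's own statement) =====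
-- stated objective: alternative
-- what changed: Replaces the single stateful flag/counter loop with two composed scans: find the suffix at the nth start marker, take through the first end marker, then slice [1:-1]; markers are lowercased once and the scan stops early at the end marker instead of walking the whole list.
import Mathlib
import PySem

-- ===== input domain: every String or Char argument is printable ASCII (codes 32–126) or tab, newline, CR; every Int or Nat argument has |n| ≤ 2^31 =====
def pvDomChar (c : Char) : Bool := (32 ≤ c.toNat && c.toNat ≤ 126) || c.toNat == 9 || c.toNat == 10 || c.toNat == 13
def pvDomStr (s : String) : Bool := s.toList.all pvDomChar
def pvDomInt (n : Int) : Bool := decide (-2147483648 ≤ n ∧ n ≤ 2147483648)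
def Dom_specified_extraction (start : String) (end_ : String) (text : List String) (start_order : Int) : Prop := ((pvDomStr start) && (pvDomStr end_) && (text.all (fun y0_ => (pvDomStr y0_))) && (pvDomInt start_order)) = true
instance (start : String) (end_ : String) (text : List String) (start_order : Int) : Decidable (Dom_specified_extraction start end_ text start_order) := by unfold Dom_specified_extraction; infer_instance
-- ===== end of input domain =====

-- B replaces A's single stateful flag/counter loop by two composed scans (nth-start suffix, take-through-end) followed by a [1:-1] slice; alternative decomposition, same results.

-- ===== PORT A =====
-- loop body of A; state (extraction, extracted_text, current_order)
def stepA (start end_ : String) (start_order : Int) :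
    Bool × List String × Int → String → Bool × List String × Int
  | (extraction, acc, c), word =>
    let p : Bool × Int :=
      if PySem.Str.lower start = PySem.Str.lower word then
        ((if c + 1 = start_order then true else extraction), c + 1)
      else (extraction, c)
    ((if PySem.Str.lower end_ = PySem.Str.lower word then false else p.1),
     (if p.1 then acc ++ [word] else acc), p.2)

def specified_extraction (start : String) (end_ : String) (text : List String) (start_order : Int) : List String :=
  PySem.List.slice (text.foldl (stepA start end_ start_order) (false, [], 0)).2.1 (some 1) (some (-1))

-- ===== PORT B =====
-- suffix of words beginning at the n-th word whose lowercase equals sl (caller checks n ≥ 1)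
def nthSuffix (sl : String) : List String → Int → Option (List String)
  | [], _ => none
  | w :: ws, n =>
      if PySem.Str.lower w = sl then
        (if n = 1 then some (w :: ws) else nthSuffix sl ws (n - 1))
      else nthSuffix sl ws n

-- prefix of tail up to and including the first word whose lowercase equals el
def takeThrough (el : String) : List String → List String
  | [] => []
  | w :: ws => if PySem.Str.lower w = el then [w] else w :: takeThrough el ws

def specified_extraction_alt (start : String) (end_ : String) (text : List String) (start_order : Int) : List String :=
  match (if start_order < 1 then none
         else nthSuffix (PySem.Str.lower start) text start_order) with
  | none => []
  | some tail => PySem.List.slice (takeThrough (PySem.Str.lower end_) tail) (some 1) (some (-1))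

-- ===== PRECONDITION & SPEC =====
def Spec_specified_extraction (start : String) (end_ : String) (text : List String) (start_order : Int) (out : List String) : Prop := out = specified_extraction_alt start end_ text start_order
instance (start : String) (end_ : String) (text : List String) (start_order : Int) (out : List String) : Decidable (Spec_specified_extraction start end_ text start_order out) := by unfold Spec_specified_extraction; infer_instance

-- ===== CLAIM (what is proved, stated in full; the proofs are below) =====
def Claim_equal_specified_extraction : Prop := ∀ (start : String) (end_ : String) (text : List String) (start_order : Int), Dom_specified_extraction start end_ text start_order → Spec_specified_extraction start end_ text start_order (specified_extraction start end_ text start_order)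

-- ===== LEMMAS AND PROOFS =====

-- once the trigger can no longer fire (start_order ≤ c) and extraction is off, the accumulator is final
theorem foldl_off (start end_ : String) (so : Int) :
    ∀ (rest : List String) (acc : List String) (c : Int), so ≤ c →
      (rest.foldl (stepA start end_ so) (false, acc, c)).2.1 = acc := by
  intro rest
  induction rest with
  | nil => intro acc c _; rfl
  | cons w ws ih =>
    intro acc c hc
    simp only [List.foldl_cons, stepA]
    by_cases hs : PySem.Str.lower start = PySem.Str.lower w
    · have ht : ¬ (c + 1 = so) := by omega
      simp only [if_pos hs, if_neg ht]
      simpa using ih acc (c + 1) (by omega)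
    · simp only [if_neg hs]
      simpa using ih acc c hc
-- while extraction is on and the trigger cannot re-fire, the loop appends takeThrough of the rest
theorem foldl_on (start end_ : String) (so : Int) :
    ∀ (rest : List String) (acc : List String) (c : Int), so ≤ c →
      (rest.foldl (stepA start end_ so) (true, acc, c)).2.1
        = acc ++ takeThrough (PySem.Str.lower end_) rest := by
  intro rest
  induction rest with
  | nil => intro acc c _; simp [takeThrough]
  | cons w ws ih =>
    intro acc c hc
    simp only [List.foldl_cons, stepA, takeThrough]
    by_cases he : PySem.Str.lower end_ = PySem.Str.lower w
    · have hw : PySem.Str.lower w = PySem.Str.lower end_ := he.symm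
      by_cases hs : PySem.Str.lower start = PySem.Str.lower w
      · have ht : ¬ (c + 1 = so) := by omega
        simp only [if_pos hs, if_neg ht, if_pos he, if_pos hw]
        simpa using foldl_off start end_ so ws (acc ++ [w]) (c + 1) (by omega)
      · simp only [if_neg hs, if_pos he, if_pos hw]
        simpa using foldl_off start end_ so ws (acc ++ [w]) c hc
    · have hw : ¬ (PySem.Str.lower w = PySem.Str.lower end_) := fun h => he h.symm
      by_cases hs : PySem.Str.lower start = PySem.Str.lower w
      · have ht : ¬ (c + 1 = so) := by omega
        simp only [if_pos hs, if_neg ht, if_neg he, if_neg hw]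
        rw [show (acc ++ (w :: takeThrough (PySem.Str.lower end_) ws)) = (acc ++ [w]) ++ takeThrough (PySem.Str.lower end_) ws by simp]
        simpa using ih (acc ++ [w]) (c + 1) (by omega)
      · simp only [if_neg hs, if_neg he, if_neg hw]
        rw [show (acc ++ (w :: takeThrough (PySem.Str.lower end_) ws)) = (acc ++ [w]) ++ takeThrough (PySem.Str.lower end_) ws by simp]
        simpa using ih (acc ++ [w]) c hc
-- proof helper: the block B extracts from an optional tail
def tailBlock (el : String) : Option (List String) → List String
  | none => []
  | some tail => takeThrough el tail

-- before the trigger (c < start_order, extraction off): the result is governed by nthSuffix/takeThrough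
theorem foldl_pre (start end_ : String) (so : Int) :
    ∀ (rest : List String) (acc : List String) (c : Int), c < so →
      (rest.foldl (stepA start end_ so) (false, acc, c)).2.1
        = acc ++ tailBlock (PySem.Str.lower end_) (nthSuffix (PySem.Str.lower start) rest (so - c)) := by
  intro rest
  induction rest with
  | nil => intro acc c _; simp [nthSuffix, tailBlock]
  | cons w ws ih =>
    intro acc c hc
    simp only [List.foldl_cons, stepA, nthSuffix]
    by_cases hs : PySem.Str.lower start = PySem.Str.lower w
    · by_cases ht : c + 1 = so
      · have h1 : so - c = 1 := by omega
        by_cases he : PySem.Str.lower end_ = PySem.Str.lower w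
        · simp [hs, ht, h1, he, tailBlock, takeThrough]
          simpa [ht] using foldl_off start end_ so ws (acc ++ [w]) (c + 1) (by omega)
        · have hw2 : ¬ (PySem.Str.lower w = PySem.Str.lower end_) := fun h => he h.symm
          simp [hs, ht, h1, he, hw2, tailBlock, takeThrough]
          simpa [ht] using foldl_on start end_ so ws (acc ++ [w]) (c + 1) (by omega)
      · have h1 : ¬ (so - c = 1) := by omega
        have h2 : so - c - 1 = so - (c + 1) := by omega
        by_cases he : PySem.Str.lower end_ = PySem.Str.lower w
        · simp [hs, ht, h1, h2, he]
          simpa [hs, he] using ih acc (c + 1) (by omega)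
        · simp [hs, ht, h1, h2, he]
          simpa [hs] using ih acc (c + 1) (by omega)
    · have hw : ¬ (PySem.Str.lower w = PySem.Str.lower start) := fun h => hs h.symm
      by_cases he : PySem.Str.lower end_ = PySem.Str.lower w
      · simp [hs, hw, he]
        simpa [he] using ih acc c hc
      · simp [hs, hw, he]
        simpa using ih acc c hc

-- ===== VERDICT (by name: the statement is the Claim_ definition above) =====
theorem specified_extraction_spec : Claim_equal_specified_extraction := by
  intro start end_ text start_order _
  unfold Spec_specified_extraction specified_extraction specified_extraction_alt
  by_cases h : start_order < 1
  · rw [if_pos h, foldl_off start end_ start_order text [] 0 (by omega)]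
    rfl
  · rw [if_neg h, foldl_pre start end_ start_order text [] 0 (by omega), Int.sub_zero]
    cases hn : nthSuffix (PySem.Str.lower start) text start_order with
    | none => simp [tailBlock]; rfl
    | some tail => simp [tailBlock]
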